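-- pv_equiv track=rewrite | github.com/Isaacli0520/leetcode | code/2262_total_appeal_of_a_string.py | appealSum
-- ===== SOURCE A (Python) =====
-- def appealSum(s: str) -> int:
--     # d marks the position + 1 of the last occurance of every
--     # character.
--     # Example: god => godo
--     #   org substrings:    d,  od,  god  =     1 + 2 + 3
--     #   new substrings: o, do, odo, godo = 1 + 2 + 2 + 3
--     #
--     #   only substrings that don't include 'o' will have
--     #   an increase in distinct chars.
--     #   Therefore, the new prev is 1 + i - d.get(s[i], 0)
--     #   The best case is that the char never appeared before
--     #   so we simply increase prev by 1 + i; but the worse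
--     #   case is when the chars appeared before, and we want
--     #   to know its last occurance position
--     d = {}
--     d[s[0]] = 1
--     res = 1
--     prev = 1
--     for i in range(1, len(s)):
--         prev += 1 + i - d.get(s[i], 0)
--         d[s[i]] = i + 1
--         res += prev
--     return res
-- ===== SOURCE B (Python) =====
-- def appealSum(s: str) -> int:
--     # Sum each character's direct contribution: a char at index i is the
--     # first occurrence in every substring starting after its previous
--     # occurrence and ending at or after i.
--     n = len(s)
--     last = {}
--     total = 0
--     for i, c in enumerate(s):
--         total += (i - last.get(c, -1)) * (n - i)
--         last[c] = i
--     return total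
-- ===== Notes on version B (the rewrite author's own statement) =====
-- stated objective: idiomatic
-- what changed: B sums each character's direct contribution (i - last_occurrence) * (n - i) in one enumerate pass with a last-index dict, instead of A's running per-ending-position accumulator prev/res seeded from s[0].
import Mathlib
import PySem

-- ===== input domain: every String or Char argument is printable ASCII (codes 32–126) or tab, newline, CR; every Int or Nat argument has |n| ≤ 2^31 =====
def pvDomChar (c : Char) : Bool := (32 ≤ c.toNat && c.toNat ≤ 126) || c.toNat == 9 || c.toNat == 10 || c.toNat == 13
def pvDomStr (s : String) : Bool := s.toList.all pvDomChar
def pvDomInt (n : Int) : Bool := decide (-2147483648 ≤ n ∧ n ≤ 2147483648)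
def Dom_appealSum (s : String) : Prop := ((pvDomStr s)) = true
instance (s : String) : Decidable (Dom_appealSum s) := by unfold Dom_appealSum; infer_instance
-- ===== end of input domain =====

-- B replaces A's running per-ending-position accumulator (prev/res seeded from s[0])
-- by a single enumerate pass summing each character's direct contribution
-- (i - last_occurrence) * (n - i); same O(n) cost, more idiomatic.

-- ===== PORT A =====
-- the for-loop of A: state (i, d, res, prev), one step per index i = 1 .. len(s)-1
def appealSumLoopA : List Char → Int → PySem.Dict Char Int → Int → Int → Int
  | [], _, _, res, _ => res
  | c :: t, i, d, res, prev =>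
      let prev' := prev + 1 + i - d.getD c 0
      appealSumLoopA t (i + 1) (d.insert c (i + 1)) (res + prev') prev'

def appealSum (s : String) : Int :=
  match s.toList with
  | [] => 0  -- unreachable under Pre_appealSum: Python raises IndexError on s[0]
  | c0 :: t => appealSumLoopA t 1 (PySem.Dict.empty.insert c0 1) 1 1

-- ===== PORT B =====
-- the for-loop of B: state (i, last, total), one step per (i, c) of enumerate(s)
def appealSumLoopB : List Char → Int → Int → PySem.Dict Char Int → Int → Int
  | [], _, _, _, total => total
  | c :: t, i, n, last, total =>
      appealSumLoopB t (i + 1) n (last.insert c i) (total + (i - last.getD c (-1)) * (n - i))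

def appealSum_alt (s : String) : Int :=
  appealSumLoopB s.toList 0 (s.toList.length : Int) PySem.Dict.empty 0

-- ===== PRECONDITION & SPEC =====
-- Pre_ excludes only the empty string, on which A raises IndexError reading s[0].
def Pre_appealSum (s : String) : Prop := s ≠ ""
instance (s : String) : Decidable (Pre_appealSum s) := by unfold Pre_appealSum; infer_instance
def pvWitness_appealSum : String := "abca"

def Spec_appealSum (s : String) (out : Int) : Prop := out = appealSum_alt s
instance (s : String) (out : Int) : Decidable (Spec_appealSum s out) := by unfold Spec_appealSum; infer_instance

-- ===== CLAIM (what is proved, stated in full; the proofs are below) =====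
def Claim_equal_appealSum : Prop := ∀ (s : String), Dom_appealSum s → Pre_appealSum s → Spec_appealSum s (appealSum s)

-- ===== LEMMAS AND PROOFS =====

-- B's loop is affine in its accumulator.
theorem appealSumLoopB_acc (t : List Char) : ∀ (i n : Int) (d : PySem.Dict Char Int) (tot : Int),
    appealSumLoopB t i n d tot = tot + appealSumLoopB t i n d 0 := by
  induction t with
  | nil => intro i n d tot; simp [appealSumLoopB]
  | cons c t ih =>
      intro i n d tot
      simp only [appealSumLoopB]
      rw [ih, ih (i + 1) n (d.insert c i) (0 + (i - d.getD c (-1)) * (n - i))]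
      ring

-- Main invariant: if dA stores last-occurrence+1 wherever dB stores last occurrence
-- (default 0 vs -1), then A's loop equals res + prev·|t| plus B's loop on the same tail.
theorem appealSumLoop_rel (t : List Char) : ∀ (i : Int) (dA dB : PySem.Dict Char Int) (res prev : Int),
    (∀ c, dA.getD c 0 = dB.getD c (-1) + 1) →
    appealSumLoopA t i dA res prev = res + prev * (t.length : Int) + appealSumLoopB t i (i + (t.length : Int)) dB 0 := by
  induction t with
  | nil => intro i dA dB res prev _; simp [appealSumLoopA, appealSumLoopB]
  | cons c t ih =>
      intro i dA dB res prev h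
      simp only [appealSumLoopA, appealSumLoopB]
      have hrel : ∀ c', (dA.insert c (i + 1)).getD c' 0 = (dB.insert c i).getD c' (-1) + 1 := by
        intro c'
        rw [PySem.Dict.getD_insert, PySem.Dict.getD_insert]
        by_cases hc : c' = c
        · simp [hc]
        · simp [hc, h c']
      rw [ih (i + 1) _ _ _ _ hrel,
          appealSumLoopB_acc t (i + 1) (i + ((c :: t).length : Int)) (dB.insert c i)
            (0 + (i - dB.getD c (-1)) * (i + ((c :: t).length : Int) - i))]
      have hA := h c
      simp only [List.length_cons]
      push_cast
      have : (i + 1) + (t.length : Int) = i + ((t.length : Int) + 1) := by ring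
      rw [this]
      nlinarith [hA]

-- the initial dicts {s[0] ↦ 1} and {s[0] ↦ 0} satisfy the invariant
theorem appealSum_init_rel (c0 : Char) :
    ∀ c, (PySem.Dict.empty.insert c0 (1 : Int)).getD c 0 = ((PySem.Dict.empty (ν := Int)).insert c0 0).getD c (-1) + 1 := by
  intro c
  rw [PySem.Dict.getD_insert, PySem.Dict.getD_insert]
  by_cases hc : c = c0 <;> simp [hc, PySem.Dict.getD_empty]

-- ===== VERDICT (by name: the statement is the Claim_ definition above) =====
theorem appealSum_spec : Claim_equal_appealSum := by
  intro s _ hpre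
  unfold Spec_appealSum appealSum appealSum_alt
  have hne : s.toList ≠ [] := by
    simpa [String.toList_eq_nil_iff] using hpre
  cases hl : s.toList with
  | nil => exact absurd hl hne
  | cons c0 t =>
      show appealSumLoopA t 1 (PySem.Dict.empty.insert c0 1) 1 1 =
        appealSumLoopB (c0 :: t) 0 ((c0 :: t).length : Int) PySem.Dict.empty 0
      rw [appealSumLoop_rel t 1 _ _ 1 1 (appealSum_init_rel c0)]
      simp only [appealSumLoopB, List.length_cons]
      rw [appealSumLoopB_acc t 1 _ (PySem.Dict.empty.insert c0 0)]
      simp [PySem.Dict.getD_empty]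
      rw [show (1 + (t.length : Int)) = ((t.length : Int) + 1) from by ring,
          appealSumLoopB_acc t 1 ((t.length : Int) + 1) (PySem.Dict.empty.insert c0 0) ((t.length : Int) + 1)]
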